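-- pv_equiv track=rewrite | github.com/NVIDIA/swift | swift/common/utils/checksum.py | crc64nvme_ref
-- ===== SOURCE A (Python) =====
-- def crc64nvme_ref(data, value=0):
--     # Dumb-as-dirt CRC64-NVME implementation
--     # polynomial is 0xad93d23594c93659
--     p = 0x9a6c9329ac4bc9b5  # reversed polynomial
--     rem = value ^ 0xffff_ffff_ffff_ffff
--     for x in data:
--         rem ^= x
--         for _ in range(8):
--             if rem & 1:
--                 rem = (rem >> 1) ^ p
--             else:
--                 rem = (rem >> 1)
--     return rem ^ 0xffff_ffff_ffff_ffff
-- ===== SOURCE B (Python) =====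
-- # Table-driven CRC64-NVME: 256-entry table precomputed once, one lookup per element
-- # instead of A's 8 bit-steps per element.
-- _P = 0x9a6c9329ac4bc9b5  # reversed polynomial
--
--
-- def _crc_byte(b):
--     r = b
--     for _ in range(8):
--         r = (r >> 1) ^ _P if r & 1 else r >> 1
--     return r
--
--
-- _TABLE = [_crc_byte(b) for b in range(256)]
--
--
-- def crc64nvme_ref(data, value=0):
--     rem = value ^ 0xffff_ffff_ffff_ffff
--     for x in data:
--         r = rem ^ x
--         rem = (r >> 8) ^ _TABLE[r & 0xff]
--     return rem ^ 0xffff_ffff_ffff_ffff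
-- ===== Notes on version B (the rewrite author's own statement) =====
-- stated objective: faster
-- what changed: Replaces the per-element 8-iteration bit-by-bit CRC loop with a 256-entry lookup table precomputed once, so each data element costs one shift, one mask and one table lookup.
import Mathlib
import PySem

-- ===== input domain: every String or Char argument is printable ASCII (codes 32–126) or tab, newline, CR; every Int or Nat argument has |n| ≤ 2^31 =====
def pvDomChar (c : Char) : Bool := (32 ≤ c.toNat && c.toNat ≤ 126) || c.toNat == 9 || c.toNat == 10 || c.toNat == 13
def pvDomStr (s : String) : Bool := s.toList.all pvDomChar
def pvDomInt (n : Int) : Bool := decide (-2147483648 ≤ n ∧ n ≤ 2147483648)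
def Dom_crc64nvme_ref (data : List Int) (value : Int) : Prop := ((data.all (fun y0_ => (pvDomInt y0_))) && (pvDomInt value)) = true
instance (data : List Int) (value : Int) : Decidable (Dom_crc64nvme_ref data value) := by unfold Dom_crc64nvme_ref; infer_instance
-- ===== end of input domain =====

-- B replaces A's per-element 8-iteration bit loop by a 256-entry CRC table precomputed
-- once (one shift + mask + lookup per element); measured constant-factor speedup.


-- ===== PORT A =====
-- literal port of A: for each x, xor it in, then 8 bit-steps on rem
def crc64nvme_ref (data : List Int) (value : Int) : Int :=
  let p : Int := 0x9a6c9329ac4bc9b5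
  let rem := data.foldl
    (fun rem x =>
      (PySem.List.pyRange 0 8).foldl
        (fun rem _ =>
          if PySem.Int.band rem 1 = 1 then PySem.Int.bxor (rem >>> (1:Nat)) p
          else rem >>> (1:Nat))
        (PySem.Int.bxor rem x))
    (PySem.Int.bxor value 0xffffffffffffffff)
  PySem.Int.bxor rem 0xffffffffffffffff

-- ===== PORT B =====
-- port of Source B: _crc_byte, the 256-entry table, and the one-lookup-per-element loop
def pvCrcByte (b : Int) : Int :=
  (PySem.List.pyRange 0 8).foldl
    (fun r _ =>
      if PySem.Int.band r 1 = 1 then PySem.Int.bxor (r >>> (1:Nat)) 0x9a6c9329ac4bc9b5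
      else r >>> (1:Nat))
    b

def pvCrcTable : List Int := (PySem.List.pyRange 0 256).map pvCrcByte

def crc64nvme_ref_alt (data : List Int) (value : Int) : Int :=
  let rem := data.foldl
    (fun rem x =>
      let r := PySem.Int.bxor rem x
      -- _TABLE[r & 0xff]: the index is always in range, so pyGetD is exact here
      PySem.Int.bxor (r >>> (8:Nat)) (PySem.List.pyGetD pvCrcTable (PySem.Int.band r 255) 0))
    (PySem.Int.bxor value 0xffffffffffffffff)
  PySem.Int.bxor rem 0xffffffffffffffff

-- ===== PRECONDITION & SPEC =====
def Spec_crc64nvme_ref (data : List Int) (value : Int) (out : Int) : Prop := out = crc64nvme_ref_alt data value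
instance (data : List Int) (value : Int) (out : Int) : Decidable (Spec_crc64nvme_ref data value out) := by unfold Spec_crc64nvme_ref; infer_instance

-- ===== CLAIM (what is proved, stated in full; the proofs are below) =====
def Claim_equal_crc64nvme_ref : Prop := ∀ (data : List Int) (value : Int), Dom_crc64nvme_ref data value → Spec_crc64nvme_ref data value (crc64nvme_ref data value)

-- ===== LEMMAS AND PROOFS =====

-- proof-side abbreviations
def pvStep (r : Int) : Int :=
  if PySem.Int.band r 1 = 1 then PySem.Int.bxor (r >>> (1:Nat)) 0x9a6c9329ac4bc9b5
  else r >>> (1:Nat)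
def pvStep8 (r : Int) : Int := pvStep (pvStep (pvStep (pvStep (pvStep (pvStep (pvStep (pvStep r)))))))

-- testBit bridge for PySem.Int bitwise operations

lemma pv_tb_nonneg (a : Int) (h : 0 ≤ a) (k : Nat) : a.testBit k = a.toNat.testBit k := by
  cases a with
  | ofNat m => rfl
  | negSucc m => simp at h

lemma pv_tb_neg (a : Int) (h : a < 0) (k : Nat) : a.testBit k = !((-a-1).toNat.testBit k) := by
  cases a with
  | ofNat m => simp at h; omega
  | negSucc m =>
      have h1 : (-Int.negSucc m - 1) = (m : Int) := by rw [Int.negSucc_eq]; ring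
      rw [h1, Int.toNat_natCast]
      rfl

lemma pv_ext {a b : Int} (h : ∀ k, a.testBit k = b.testBit k) : a = b := by
  have big : ∀ (m n : Nat), m.testBit (m + n + 1) = false := fun m n =>
    Nat.testBit_lt_two_pow (lt_of_lt_of_le Nat.lt_two_pow_self (Nat.pow_le_pow_right (by norm_num) (by omega)))
  cases a with
  | ofNat m =>
      cases b with
      | ofNat n =>
          have := Nat.eq_of_testBit_eq (x := m) (y := n) (fun k => h k)
          simp [this]
      | negSucc n =>
          have hk := h (m + n + 1)
          have h1 : m.testBit (m+n+1) = false := big m n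
          have h2 : n.testBit (m+n+1) = false := by
            have := big n m; rw [show n+m+1 = m+n+1 by omega] at this; exact this
          rw [show (Int.ofNat m).testBit (m+n+1) = m.testBit (m+n+1) from rfl,
              show (Int.negSucc n).testBit (m+n+1) = !n.testBit (m+n+1) from rfl, h1, h2] at hk
          simp at hk
  | negSucc m =>
      cases b with
      | ofNat n =>
          have hk := h (m + n + 1)
          have h1 : m.testBit (m+n+1) = false := big m n
          have h2 : n.testBit (m+n+1) = false := by
            have := big n m; rw [show n+m+1 = m+n+1 by omega] at this; exact this
          rw [show (Int.negSucc m).testBit (m+n+1) = !m.testBit (m+n+1) from rfl,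
              show (Int.ofNat n).testBit (m+n+1) = n.testBit (m+n+1) from rfl, h1, h2] at hk
          simp at hk
      | negSucc n =>
          have := Nat.eq_of_testBit_eq (x := m) (y := n) (fun k => by
            have hk := h k
            rw [show (Int.negSucc m).testBit k = !m.testBit k from rfl,
                show (Int.negSucc n).testBit k = !n.testBit k from rfl] at hk
            exact Bool.not_inj hk)
          simp [this]

set_option maxRecDepth 8192 in
lemma pv_sub_xor : ∀ l < 256, 255 - l = 255 ^^^ l := by decide

lemma pv_tb_255 (k : Nat) : (255 : Nat).testBit k = decide (k < 8) := by
  by_cases h : k < 8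
  · interval_cases k <;> decide
  · have hp : (255:Nat) < 2^k :=
      lt_of_lt_of_le (show (255:Nat) < 2^8 by norm_num) (Nat.pow_le_pow_right (by norm_num) (by omega))
    rw [Nat.testBit_lt_two_pow hp]; simp [h]

lemma pv_tb_band255 (a : Int) (k : Nat) :
    (PySem.Int.band a 255).testBit k = (a.testBit k && decide (k < 8)) := by
  unfold PySem.Int.band
  by_cases ha : 0 ≤ a <;> simp only [ha, if_pos, if_neg, show (0:Int) ≤ 255 by norm_num, if_true, if_false]
  · rw [pv_tb_nonneg _ (by positivity) k, Int.toNat_natCast, Nat.testBit_and,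
        pv_tb_nonneg a ha k, show ((255:Int).toNat) = 255 from rfl, pv_tb_255]
  · have hm : (255:Int).toNat &&& (-a-1).toNat < 256 := by
      calc (255:Int).toNat &&& (-a-1).toNat ≤ 255 := Nat.and_le_left
        _ < 256 := by norm_num
    rw [pv_tb_nonneg _ (by positivity) k, Int.toNat_natCast,
        show ((255:Int).toNat) = 255 from rfl,
        pv_sub_xor _ (by rw [show ((255:Int).toNat) = 255 from rfl] at hm; exact hm),
        Nat.testBit_xor, Nat.testBit_and, pv_tb_255, pv_tb_neg a (by omega) k]
    cases hb : (-a-1).toNat.testBit k <;> by_cases h8 : k < 8 <;> simp [h8]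

lemma pv_band255_bounds (a : Int) : 0 ≤ PySem.Int.band a 255 ∧ PySem.Int.band a 255 < 256 := by
  unfold PySem.Int.band
  by_cases ha : 0 ≤ a <;> simp only [ha, if_pos, if_neg, show (0:Int) ≤ 255 by norm_num, if_true, if_false]
  · have : a.toNat &&& (255:Int).toNat ≤ 255 := by
      calc a.toNat &&& (255:Int).toNat ≤ (255:Int).toNat := Nat.and_le_right
        _ = 255 := rfl
    omega
  · have : (255:Int).toNat - ((255:Int).toNat &&& (-a-1).toNat) ≤ 255 := by
      have : (255:Int).toNat = 255 := rfl
      omega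
    omega

lemma pv_band1 (a : Int) : (PySem.Int.band a 1 = 1) ↔ a.testBit 0 = true := by
  rw [PySem.Int.band_one, PySem.Int.mod_eq_emod_of_pos (by norm_num)]
  cases a with
  | ofNat m =>
      rw [show (Int.ofNat m).testBit 0 = m.testBit 0 from rfl, Nat.testBit_zero,
          show (Int.ofNat m) = (m:Int) from rfl]
      simp only [decide_eq_true_eq]
      omega
  | negSucc m =>
      rw [show (Int.negSucc m).testBit 0 = !m.testBit 0 from rfl, Nat.testBit_zero, Int.negSucc_eq]
      simp only [Bool.not_eq_true', decide_eq_false_iff_not]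
      omega

lemma pv_neg_lt (x : Nat) : (-(x:Int) - 1) < 0 := by omega
lemma pv_neg_red (x : Nat) : (-(-(x:Int)-1)-1).toNat = x := by omega

lemma pv_tb_bxor (a b : Int) (k : Nat) :
    (PySem.Int.bxor a b).testBit k = xor (a.testBit k) (b.testBit k) := by
  unfold PySem.Int.bxor
  by_cases ha : 0 ≤ a <;> by_cases hb : 0 ≤ b <;> simp only [ha, hb, if_pos, if_neg, if_true, if_false]
  · rw [pv_tb_nonneg _ (by positivity) k, Int.toNat_natCast, Nat.testBit_xor,
        pv_tb_nonneg a ha k, pv_tb_nonneg b hb k]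
  · rw [pv_tb_neg _ (pv_neg_lt _) k, pv_neg_red, Nat.testBit_xor,
        pv_tb_nonneg a ha k, pv_tb_neg b (by omega) k]
    cases a.toNat.testBit k <;> cases ((-b-1).toNat.testBit k) <;> rfl
  · rw [pv_tb_neg _ (pv_neg_lt _) k, pv_neg_red, Nat.testBit_xor,
        pv_tb_neg a (by omega) k, pv_tb_nonneg b hb k]
    cases ((-a-1).toNat.testBit k) <;> cases b.toNat.testBit k <;> rfl
  · rw [pv_tb_nonneg _ (by positivity) k, Int.toNat_natCast, Nat.testBit_xor,
        pv_tb_neg a (by omega) k, pv_tb_neg b (by omega) k]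
    cases ((-a-1).toNat.testBit k) <;> cases ((-b-1).toNat.testBit k) <;> rfl

lemma pv_tb_shift (a : Int) (n k : Nat) : (a >>> n).testBit k = a.testBit (n + k) := by
  cases a with
  | ofNat m =>
      rw [show (Int.ofNat m) = (m:Int) from rfl, ← Int.natCast_shiftRight]
      rw [pv_tb_nonneg _ (by positivity) k, Int.toNat_natCast, Nat.testBit_shiftRight,
          pv_tb_nonneg _ (by positivity) (n+k), Int.toNat_natCast]
  | negSucc m =>
      rw [Int.negSucc_shiftRight,
          show (Int.negSucc (m >>> n)).testBit k = !((m >>> n).testBit k) from rfl,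
          show (Int.negSucc m).testBit (n+k) = !(m.testBit (n+k)) from rfl,
          Nat.testBit_shiftRight]

-- xor algebra and step lemmas

lemma pv_bxor_cancel (a b : Int) : PySem.Int.bxor (PySem.Int.bxor a b) b = a := by
  apply pv_ext; intro k; simp [pv_tb_bxor]

lemma pv_shift_bxor (a b : Int) (n : Nat) :
    (PySem.Int.bxor a b) >>> n = PySem.Int.bxor (a >>> n) (b >>> n) := by
  apply pv_ext; intro k; simp [pv_tb_bxor, pv_tb_shift]

lemma pv_step_eq (r : Int) :
    pvStep r = PySem.Int.bxor (r >>> (1:Nat)) (if r.testBit 0 then 0x9a6c9329ac4bc9b5 else 0) := by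
  unfold pvStep
  by_cases h : r.testBit 0 = true
  · rw [if_pos ((pv_band1 r).mpr h), if_pos h]
  · rw [if_neg (fun hc => h ((pv_band1 r).mp hc)), if_neg h, PySem.Int.bxor_zero]

lemma pv_step_lin (a b : Int) :
    pvStep (PySem.Int.bxor a b) = PySem.Int.bxor (pvStep a) (pvStep b) := by
  rw [pv_step_eq, pv_step_eq, pv_step_eq, pv_shift_bxor]
  have hx : (PySem.Int.bxor a b).testBit 0 = xor (a.testBit 0) (b.testBit 0) := pv_tb_bxor a b 0
  apply pv_ext; intro k
  by_cases ha : a.testBit 0 <;> by_cases hb : b.testBit 0 <;>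
    simp only [hx, ha, hb, Bool.xor_true, Bool.xor_false, Bool.not_true, Bool.not_false,
      if_true, if_false, Bool.true_xor, Bool.false_xor, pv_tb_bxor] <;>
    cases hA : ((a >>> (1:Nat)).testBit k) <;> cases hB : ((b >>> (1:Nat)).testBit k) <;>
    cases hP : ((0x9a6c9329ac4bc9b5 : Int).testBit k) <;>
    simp [show Int.testBit 0 k = Nat.testBit 0 k from rfl, Nat.zero_testBit]

lemma pv_step_even (a : Int) (h : a.testBit 0 = false) : pvStep a = a >>> (1:Nat) := by
  rw [pv_step_eq, h, if_neg (by simp), PySem.Int.bxor_zero]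

lemma pv_step8_high (a : Int) (h : ∀ k, k < 8 → a.testBit k = false) :
    pvStep8 a = a >>> (8:Nat) := by
  have e : ∀ (i:Nat), i < 8 → pvStep (a >>> i) = a >>> (i+1) := by
    intro i hi
    rw [pv_step_even _ (by rw [pv_tb_shift]; exact h (i+0) (by omega)), ← Int.shiftRight_add]
  have e0 : pvStep a = a >>> (1:Nat) := pv_step_even a (h 0 (by norm_num))
  have e1 := e 1 (by norm_num); have e2 := e 2 (by norm_num); have e3 := e 3 (by norm_num)
  have e4 := e 4 (by norm_num); have e5 := e 5 (by norm_num); have e6 := e 6 (by norm_num)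
  have e7 := e 7 (by norm_num)
  norm_num at e1 e2 e3 e4 e5 e6 e7
  unfold pvStep8
  rw [e0, e1, e2, e3, e4, e5, e6, e7]

lemma pv_step8_decomp (r : Int) :
    pvStep8 r = PySem.Int.bxor (r >>> (8:Nat)) (pvStep8 (PySem.Int.band r 255)) := by
  set l := PySem.Int.band r 255 with hl
  set h := PySem.Int.bxor r l with hh
  have hr : PySem.Int.bxor h l = r := pv_bxor_cancel r l
  have hlow : ∀ k, k < 8 → h.testBit k = false := by
    intro k hk
    rw [hh, pv_tb_bxor, hl, pv_tb_band255]
    simp [hk]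
  have hhigh : h >>> (8:Nat) = r >>> (8:Nat) := by
    apply pv_ext; intro k
    rw [pv_tb_shift, pv_tb_shift, hh, pv_tb_bxor, hl, pv_tb_band255]
    simp
  calc pvStep8 r = pvStep8 (PySem.Int.bxor h l) := by rw [hr]
    _ = PySem.Int.bxor (pvStep8 h) (pvStep8 l) := by
          unfold pvStep8; simp only [pv_step_lin]
    _ = PySem.Int.bxor (r >>> (8:Nat)) (pvStep8 l) := by rw [pv_step8_high h hlow, hhigh]

lemma pv_crcByte_eq (b : Int) : pvCrcByte b = pvStep8 b := by
  unfold pvCrcByte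
  rw [show PySem.List.pyRange 0 8 = [0,1,2,3,4,5,6,7] by decide]
  rfl

lemma pv_table_lookup (r : Int) :
    PySem.List.pyGetD pvCrcTable (PySem.Int.band r 255) 0 = pvStep8 (PySem.Int.band r 255) := by
  obtain ⟨h0, h1⟩ := pv_band255_bounds r
  have hc : PySem.Int.band r 255 = (((PySem.Int.band r 255).toNat : Nat) : Int) :=
    (Int.toNat_of_nonneg h0).symm
  rw [pvCrcTable, show (256:Int) = ((256:Nat):Int) from rfl, hc,
      PySem.List.pyGetD_map_pyRange pvCrcByte 256 (PySem.Int.band r 255).toNat 0 (by omega),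
      pv_crcByte_eq]

lemma pv_body_eq (rem x : Int) :
    (PySem.List.pyRange 0 8).foldl
      (fun rem _ =>
        if PySem.Int.band rem 1 = 1 then PySem.Int.bxor (rem >>> (1:Nat)) 0x9a6c9329ac4bc9b5
        else rem >>> (1:Nat)) (PySem.Int.bxor rem x)
    = PySem.Int.bxor ((PySem.Int.bxor rem x) >>> (8:Nat))
        (PySem.List.pyGetD pvCrcTable (PySem.Int.band (PySem.Int.bxor rem x) 255) 0) := by
  rw [show (PySem.List.pyRange 0 8).foldl
      (fun rem _ =>
        if PySem.Int.band rem 1 = 1 then PySem.Int.bxor (rem >>> (1:Nat)) 0x9a6c9329ac4bc9b5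
        else rem >>> (1:Nat)) (PySem.Int.bxor rem x) = pvStep8 (PySem.Int.bxor rem x)
      from pv_crcByte_eq (PySem.Int.bxor rem x),
    pv_table_lookup, ← pv_step8_decomp]

-- ===== VERDICT (by name: the statement is the Claim_ definition above) =====
theorem crc64nvme_ref_spec : Claim_equal_crc64nvme_ref := by
  intro data value _
  unfold Spec_crc64nvme_ref crc64nvme_ref crc64nvme_ref_alt
  simp only [pv_body_eq]
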